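-- pv_equiv track=rewrite | github.com/hpdts/python_DSAlgo | sorted_subarray.py | printUnsorted
-- ===== SOURCE A (Python) =====
-- def printUnsorted(arr):
--     n = len(arr)
--
--     # create the temp array equal to arr
--     temp = arr[:]
--
--     # sort the temp array
--     temp.sort()
--
--     # to store the first and last index
--     # with unmatching elements
--     s = 0
--     e = 0
--
--     # find the leftmost unmatching index
--     for i in range(n):
--         if arr[i] != temp[i]:
--             s = i
--             break
--
--     # find the rightmost unmatching index
--     for i in range(n - 1, -1, -1):
--         if arr[i] != temp[i]:
--             e = i
--             break
--
--     return [s, e]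
-- ===== SOURCE B (Python) =====
-- def printUnsorted(arr):
--     # sort-free alternative to the sort-and-compare approach:
--     # e = last index whose value drops below the running max (prefix scan);
--     # s = first index whose value rises above the running min (suffix scan)
--     e = 0
--     mx = None
--     for i, x in enumerate(arr):
--         if mx is None or x >= mx:
--             mx = x
--         else:
--             e = i
--     s = 0
--     mn = None
--     for i, x in reversed(list(enumerate(arr))):
--         if mn is None or x <= mn:
--             mn = x
--         else:
--             s = i
--     return [s, e]
-- ===== Notes on version B (the rewrite author's own statement) =====
-- stated objective: alternative
-- what changed: A copies the list, sorts it, and scans twice for the first/last index where the list disagrees with its sorted copy; B never sorts: one forward pass tracking the running maximum finds the last index whose value drops below it (e), and one backward pass tracking the running minimum finds the first index whose value rises above it (s).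
import Mathlib
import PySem

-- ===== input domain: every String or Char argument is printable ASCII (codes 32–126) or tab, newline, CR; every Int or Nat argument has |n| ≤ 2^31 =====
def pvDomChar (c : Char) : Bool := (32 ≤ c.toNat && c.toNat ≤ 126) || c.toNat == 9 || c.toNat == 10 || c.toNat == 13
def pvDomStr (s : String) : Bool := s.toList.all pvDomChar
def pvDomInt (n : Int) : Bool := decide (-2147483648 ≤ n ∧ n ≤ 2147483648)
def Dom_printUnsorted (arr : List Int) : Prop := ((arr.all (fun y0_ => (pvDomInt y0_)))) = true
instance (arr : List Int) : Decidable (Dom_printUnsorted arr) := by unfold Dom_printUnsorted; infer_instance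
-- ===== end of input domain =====

-- B replaces A's sort-and-compare by two sort-free scans tracking a running max/min; return-value equivalence proved.


-- ===== PORT A =====
-- the two Python for-loops with `break` become this structural search over the index list
def pvLoopA (arr temp : List Int) : List Int → Int
  | [] => 0
  | i :: rest => if PySem.List.pyGet? arr i ≠ PySem.List.pyGet? temp i then i else pvLoopA arr temp rest

def printUnsorted (arr : List Int) : List Int :=
  let n : Int := arr.length
  let temp := PySem.List.sorted arr (fun x => x) false
  let s : Int := pvLoopA arr temp (PySem.List.pyRange 0 n 1)
  let e : Int := pvLoopA arr temp (PySem.List.pyRange (n - 1) (-1) (-1))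
  [s, e]

-- ===== PORT B =====
-- one fold step per Python loop body: state = (running max/min, recorded index)
def pvStepMax (st : Option Int × Int) (p : Int × Int) : Option Int × Int :=
  match st.1 with
  | none => (some p.2, st.2)
  | some m => if p.2 ≥ m then (some p.2, st.2) else (st.1, p.1)

def pvStepMin (st : Option Int × Int) (p : Int × Int) : Option Int × Int :=
  match st.1 with
  | none => (some p.2, st.2)
  | some m => if p.2 ≤ m then (some p.2, st.2) else (st.1, p.1)

def printUnsorted_alt (arr : List Int) : List Int :=
  let e := ((PySem.List.enumerate arr 0).foldl pvStepMax ((none : Option Int), (0:Int))).2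
  let s := ((PySem.List.enumerate arr 0).reverse.foldl pvStepMin ((none : Option Int), (0:Int))).2
  [s, e]

-- ===== PRECONDITION & SPEC =====
def Spec_printUnsorted (arr : List Int) (out : List Int) : Prop := out = printUnsorted_alt arr
instance (arr : List Int) (out : List Int) : Decidable (Spec_printUnsorted arr out) := by unfold Spec_printUnsorted; infer_instance

-- ===== CLAIM (what is proved, stated in full; the proofs are below) =====
def Claim_equal_printUnsorted : Prop := ∀ (arr : List Int), Dom_printUnsorted arr → Spec_printUnsorted arr (printUnsorted arr)

-- ===== LEMMAS AND PROOFS =====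

-- value-level predicates used to characterise both programs
def pvMism (arr t : List Int) (i : Nat) : Bool := decide (arr.getD i 0 ≠ t.getD i 0)
def pvBadS (arr : List Int) (i : Nat) : Bool := decide (∃ j < arr.length, i < j ∧ arr.getD j 0 < arr.getD i 0)
def pvBadE (arr : List Int) (i : Nat) : Bool := decide (∃ l < i, arr.getD i 0 < arr.getD l 0)

def pvFirst (n : Nat) (p : Nat → Bool) : Int :=
  match (List.range n).find? p with | some i => (i:Int) | none => 0
def pvLast (n : Nat) (p : Nat → Bool) : Int :=
  match (List.range n).reverse.find? p with | some i => (i:Int) | none => 0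

-- characterisation of find? over ranges
lemma pvFindRange_some (n : Nat) (p : Nat → Bool) (i : Nat) :
    (List.range n).find? p = some i ↔ i < n ∧ p i ∧ ∀ j < i, ¬ p j := by
  rw [List.find?_eq_some_iff_getElem]
  simp only [List.length_range, List.getElem_range]
  constructor
  · rintro ⟨hp, m, hm, rfl, hlt⟩
    exact ⟨hm, hp, fun j hj => by simpa using hlt j hj⟩
  · rintro ⟨hi, hp, hlt⟩
    exact ⟨hp, i, hi, rfl, fun j hj => by simpa using hlt j hj⟩

lemma pvFindRange_none (n : Nat) (p : Nat → Bool) :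
    (List.range n).find? p = none ↔ ∀ j < n, ¬ p j := by
  rw [List.find?_eq_none]
  simp [List.mem_range]

lemma pvFindRangeRev_some (n : Nat) (p : Nat → Bool) (i : Nat) :
    (List.range n).reverse.find? p = some i ↔ i < n ∧ p i ∧ ∀ j, i < j → j < n → ¬ p j := by
  rw [List.find?_eq_some_iff_getElem]
  simp only [List.length_reverse, List.length_range, List.getElem_reverse, List.getElem_range]
  constructor
  · rintro ⟨hp, m, hm, rfl, hlt⟩
    refine ⟨by omega, hp, fun j hij hjn => ?_⟩
    have := hlt (n - 1 - j) (by omega)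
    simpa [show n - 1 - (n - 1 - j) = j by omega] using this
  · rintro ⟨hi, hp, hlt⟩
    refine ⟨hp, n - 1 - i, by omega, by omega, fun j hj => ?_⟩
    have := hlt (n - 1 - j) (by omega) (by omega)
    simpa using this

lemma pvFindRangeRev_none (n : Nat) (p : Nat → Bool) :
    (List.range n).reverse.find? p = none ↔ ∀ j < n, ¬ p j := by
  rw [List.find?_eq_none]
  simp [List.mem_reverse, List.mem_range]

-- first/last agree for predicates with equivalent prefixes/suffixes
lemma pvFirst_congr (n : Nat) (p q : Nat → Bool)
    (h : ∀ k ≤ n, ((∀ j < k, ¬ p j) ↔ (∀ j < k, ¬ q j))) :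
    pvFirst n p = pvFirst n q := by
  unfold pvFirst
  have key : (List.range n).find? p = (List.range n).find? q := by
    cases hp : (List.range n).find? p with
    | none =>
      rw [pvFindRange_none] at hp
      rw [eq_comm, pvFindRange_none]
      exact fun j hj => ((h n le_rfl).mp (fun j' hj' => hp j' hj')) j hj
    | some i =>
      rw [pvFindRange_some] at hp
      obtain ⟨hin, hpi, hmin⟩ := hp
      rw [eq_comm, pvFindRange_some]
      refine ⟨hin, ?_, (h i (by omega)).mp hmin⟩
      by_contra hqi
      have h1 : ∀ j < i + 1, ¬ q j = true := by
        intro j hj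
        rcases Nat.lt_succ_iff_lt_or_eq.mp hj with h' | h'
        · exact (h i (by omega)).mp hmin j h'
        · subst h'; exact hqi
      exact ((h (i + 1) (by omega)).mpr h1) i (by omega) hpi
  rw [key]

lemma pvLast_congr (n : Nat) (p q : Nat → Bool)
    (h : ∀ k ≤ n, ((∀ j, k ≤ j → j < n → ¬ p j) ↔ (∀ j, k ≤ j → j < n → ¬ q j))) :
    pvLast n p = pvLast n q := by
  unfold pvLast
  have key : (List.range n).reverse.find? p = (List.range n).reverse.find? q := by
    cases hp : (List.range n).reverse.find? p with
    | none =>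
      rw [pvFindRangeRev_none] at hp
      rw [eq_comm, pvFindRangeRev_none]
      exact fun j hj => ((h 0 (by omega)).mp (fun j' _ hj' => hp j' hj')) j (by omega) hj
    | some i =>
      rw [pvFindRangeRev_some] at hp
      obtain ⟨hin, hpi, hmax⟩ := hp
      rw [eq_comm, pvFindRangeRev_some]
      refine ⟨hin, ?_, fun j hij hjn => (h (i + 1) (by omega)).mp (fun j' hj' hj'' => hmax j' (by omega) hj'') j (by omega) hjn⟩
      by_contra hqi
      have h1 : ∀ j, i ≤ j → j < n → ¬ q j = true := by
        intro j hj hjn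
        rcases Nat.eq_or_lt_of_le hj with h' | h'
        · subst h'; exact hqi
        · exact (h (i + 1) (by omega)).mp (fun j' hj' hj'' => hmax j' (by omega) hj'') j (by omega) hjn
      exact ((h i (by omega)).mpr h1) i le_rfl hin hpi
  rw [key]

-- ---- A-side: the break-loops are find? ----
lemma pvLoopA_eq_find (arr temp : List Int) (l : List Int) :
    pvLoopA arr temp l =
      match l.find? (fun i => decide (PySem.List.pyGet? arr i ≠ PySem.List.pyGet? temp i)) with
      | some i => i | none => 0 := by
  induction l with
  | nil => rfl
  | cons i rest ih =>
    by_cases hc : PySem.List.pyGet? arr i ≠ PySem.List.pyGet? temp i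
    · simp [pvLoopA, hc]
    · simp [pvLoopA, hc, ih]

lemma pvA_eq (arr : List Int) :
    printUnsorted arr =
      [pvFirst arr.length (pvMism arr (PySem.List.sorted arr (fun x => x) false)),
       pvLast arr.length (pvMism arr (PySem.List.sorted arr (fun x => x) false))] := by
  have hlen : (PySem.List.sorted arr (fun x => x) false).length = arr.length := by
    simp [PySem.List.length_sorted]
  set t := PySem.List.sorted arr (fun x => x) false with ht
  have hpred : ∀ k : Nat,
      (fun i => decide (PySem.List.pyGet? arr i ≠ PySem.List.pyGet? t i)) ((0:Int) + (k:Int)) = pvMism arr t k := by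
    intro k
    by_cases hk : k < arr.length
    · have h1 : arr[k]? = some (arr.getD k 0) := by
        rw [List.getD_eq_getElem _ _ hk]; exact List.getElem?_eq_getElem hk
      have h2 : t[k]? = some (t.getD k 0) := by
        rw [List.getD_eq_getElem _ _ (by omega)]; exact List.getElem?_eq_getElem (by omega)
      simp only [zero_add, PySem.List.pyGet?_natCast, h1, h2, pvMism]
      simp
    · have h1 : arr[k]? = none := by rw [List.getElem?_eq_none_iff]; omega
      have h2 : t[k]? = none := by rw [List.getElem?_eq_none_iff]; omega
      have h3 : arr.getD k 0 = 0 := by rw [List.getD_eq_getElem?_getD, h1]; rfl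
      have h4 : t.getD k 0 = 0 := by rw [List.getD_eq_getElem?_getD, h2]; rfl
      simp [PySem.List.pyGet?_natCast, pvMism, h1, h2]
  have hr1 : PySem.List.pyRange 0 (arr.length:Int) 1 = (List.range arr.length).map (fun k : Nat => (0:Int) + (k:Int)) := by
    have h0 : ((arr.length:Int) - 0).toNat = arr.length := by omega
    rw [PySem.List.pyRange_one, h0]
  have hr2 : PySem.List.pyRange ((arr.length:Int) - 1) (-1) (-1) = ((List.range arr.length).map (fun k : Nat => (0:Int) + (k:Int))).reverse := by
    rw [PySem.List.pyRange_neg_one_eq_reverse, show (-1:Int) + 1 = 0 by norm_num,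
        show (arr.length:Int) - 1 + 1 = (arr.length:Int) by ring, hr1]
  simp only [printUnsorted, ← ht]
  rw [pvLoopA_eq_find, pvLoopA_eq_find, hr1, hr2, ← List.map_reverse, List.find?_map, List.find?_map]
  have hfun : ((fun i => decide (PySem.List.pyGet? arr i ≠ PySem.List.pyGet? t i)) ∘ (fun k : Nat => (0:Int) + (k:Int))) = pvMism arr t := by
    funext k; exact hpred k
  rw [hfun]
  unfold pvFirst pvLast
  cases h1 : (List.range arr.length).find? (pvMism arr t) <;>
    cases h2 : (List.range arr.length).reverse.find? (pvMism arr t) <;>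
      simp

-- ---- B-side: fold invariants ----

lemma pvFind?_congr {A : Type} (l : List A) (p q : A → Bool) (h : ∀ x ∈ l, p x = q x) :
    l.find? p = l.find? q := by
  induction l with
  | nil => rfl
  | cons a l ih =>
    rw [List.find?_cons, List.find?_cons, h a (by simp)]
    cases hq : q a
    · simpa using ih (fun x hx => h x (by simp [hx]))
    · rfl

lemma pvGetD_append_lt (xs ys : List Int) (i : Nat) (h : i < xs.length) :
    (xs ++ ys).getD i 0 = xs.getD i 0 := by
  rw [List.getD_eq_getElem?_getD, List.getD_eq_getElem?_getD, List.getElem?_append_left h]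

lemma pvGetD_append_self (xs : List Int) (x : Int) :
    (xs ++ [x]).getD xs.length 0 = x := by
  rw [List.getD_eq_getElem?_getD]
  simp

lemma pvBadE_append_lt (xs : List Int) (x : Int) (i : Nat) (h : i < xs.length) :
    pvBadE (xs ++ [x]) i = pvBadE xs i := by
  simp only [pvBadE, decide_eq_decide]
  constructor
  · rintro ⟨l, hl, hlt⟩
    exact ⟨l, hl, by rwa [pvGetD_append_lt _ _ _ h, pvGetD_append_lt _ _ _ (by omega)] at hlt⟩
  · rintro ⟨l, hl, hlt⟩
    exact ⟨l, hl, by rwa [pvGetD_append_lt _ _ _ h, pvGetD_append_lt _ _ _ (by omega)]⟩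

lemma pvBadS_cons_succ (y : Int) (ys : List Int) (j : Nat) :
    pvBadS (y :: ys) (j + 1) = pvBadS ys j := by
  simp only [pvBadS, decide_eq_decide, List.length_cons]
  constructor
  · rintro ⟨j2, hj2, hlt, hv⟩
    obtain ⟨j3, rfl⟩ : ∃ j3, j2 = j3 + 1 := ⟨j2 - 1, by omega⟩
    exact ⟨j3, by omega, by omega, by simpa [List.getD_cons_succ] using hv⟩
  · rintro ⟨j3, hj3, hlt, hv⟩
    exact ⟨j3 + 1, by omega, by omega, by simpa [List.getD_cons_succ] using hv⟩

lemma pvEnum_append (xs : List Int) (y : Int) (s : Int) :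
    PySem.List.enumerate (xs ++ [y]) s = PySem.List.enumerate xs s ++ [(s + xs.length, y)] := by
  induction xs generalizing s with
  | nil => simp [PySem.List.enumerate_nil, PySem.List.enumerate_cons]
  | cons a xs ih =>
    rw [List.cons_append, PySem.List.enumerate_cons, PySem.List.enumerate_cons, ih, List.length_cons]
    have harith : s + 1 + (xs.length : Int) = s + ((xs.length : Int) + 1) := by ring
    push_cast
    rw [harith]
    simp

lemma pvFoldMax_inv (ys : List Int) :
    (PySem.List.enumerate ys 0).foldl pvStepMax ((none : Option Int), (0:Int)) =
      (ys.max?, pvLast ys.length (pvBadE ys)) := by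
  induction ys using List.reverseRecOn with
  | nil => rfl
  | append_singleton xs x ih =>
    rw [pvEnum_append, List.foldl_append, ih]
    rcases hm : xs.max? with _ | m
    · have hxs : xs = [] := List.max?_eq_none_iff.mp hm
      subst hxs
      simp [pvStepMax, pvLast, pvBadE, List.find?]
    · obtain ⟨hmem, hub⟩ := List.max?_eq_some_iff.mp hm
      have hmax : (xs ++ [x]).max? = some (max m x) := by
        rw [List.max?_eq_some_iff]
        constructor
        · rcases max_cases m x with ⟨he, _⟩ | ⟨he, _⟩ <;> rw [he] <;> simp [hmem]
        · intro b hb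
          rcases List.mem_append.mp hb with h | h
          · exact le_trans (hub b h) (le_max_left m x)
          · have hb' : b = x := by simpa using h
            rw [hb']
            exact le_max_right m x
      have hlast : pvLast (xs ++ [x]).length (pvBadE (xs ++ [x])) =
          match pvBadE (xs ++ [x]) xs.length with
          | true => (xs.length : Int)
          | false => pvLast xs.length (pvBadE xs) := by
        unfold pvLast
        rw [show (xs ++ [x]).length = xs.length + 1 by simp, List.range_succ, List.reverse_append]
        simp only [List.reverse_singleton, List.singleton_append, List.find?_cons]
        cases hb : pvBadE (xs ++ [x]) xs.length
        · rw [pvFind?_congr ((List.range xs.length).reverse) _ (pvBadE xs)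
            (fun i hi => pvBadE_append_lt xs x i (by simpa [List.mem_range] using hi))]
        · rfl
      by_cases hge : x ≥ m
      · have hb : pvBadE (xs ++ [x]) xs.length = false := by
          simp only [pvBadE, decide_eq_false_iff_not]
          rintro ⟨l, hl, hlt⟩
          rw [pvGetD_append_self, pvGetD_append_lt _ _ _ hl] at hlt
          have : xs.getD l 0 ∈ xs := by
            rw [List.getD_eq_getElem _ _ hl]; exact List.getElem_mem hl
          exact absurd hlt (by have := hub _ this; omega)
        rw [hlast, hb]
        simp [pvStepMax, hge, hmax]
      · have hb : pvBadE (xs ++ [x]) xs.length = true := by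
          simp only [pvBadE, decide_eq_true_eq]
          obtain ⟨l, hl, hv⟩ := List.mem_iff_getElem.mp hmem
          refine ⟨l, hl, ?_⟩
          rw [pvGetD_append_self, pvGetD_append_lt _ _ _ hl, List.getD_eq_getElem _ _ hl, hv]
          omega
        rw [hlast, hb]
        simp [pvStepMax, hge, hmax, max_eq_left (by omega : x ≤ m)]

lemma pvFoldMin_inv (ys : List Int) (s : Int) :
    (PySem.List.enumerate ys s).reverse.foldl pvStepMin ((none : Option Int), (0:Int)) =
      (ys.min?,
        match (List.range ys.length).find? (pvBadS ys) with
        | some i => s + i | none => 0) := by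
  induction ys generalizing s with
  | nil => rfl
  | cons y ys ih =>
    have hrev : (PySem.List.enumerate (y :: ys) s).reverse =
        (PySem.List.enumerate ys (s + 1)).reverse ++ [(s, y)] := by
      rw [PySem.List.enumerate_cons]; simp
    rw [hrev, List.foldl_append, ih]
    rcases hm : ys.min? with _ | m
    · have hys : ys = [] := List.min?_eq_none_iff.mp hm
      subst hys
      simp [pvStepMin, pvBadS, List.find?]
    · obtain ⟨hmem, hlb⟩ := List.min?_eq_some_iff.mp hm
      have hmin : (y :: ys).min? = some (min y m) := by
        simp [List.min?_cons, hm]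
      have hfind : (List.range (y :: ys).length).find? (pvBadS (y :: ys)) =
          match pvBadS (y :: ys) 0 with
          | true => some 0
          | false => Option.map Nat.succ ((List.range ys.length).find? (pvBadS ys)) := by
        rw [show (y :: ys).length = ys.length + 1 by simp, List.range_succ_eq_map, List.find?_cons]
        cases hb : pvBadS (y :: ys) 0
        · rw [List.find?_map]
          have : (pvBadS (y :: ys) ∘ Nat.succ) = pvBadS ys := by
            funext j; exact pvBadS_cons_succ y ys j
          rw [this]
        · rfl
      by_cases hle : y ≤ m
      · have hb : pvBadS (y :: ys) 0 = false := by
          simp only [pvBadS, decide_eq_false_iff_not]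
          rintro ⟨j, hj, hpos, hlt⟩
          obtain ⟨j2, rfl⟩ : ∃ j2, j = j2 + 1 := ⟨j - 1, by omega⟩
          rw [List.getD_cons_succ, List.getD_cons_zero] at hlt
          have hj2 : j2 < ys.length := by simpa using hj
          have : ys.getD j2 0 ∈ ys := by
            rw [List.getD_eq_getElem _ _ hj2]; exact List.getElem_mem hj2
          exact absurd hlt (by have := hlb _ this; omega)
        rw [hfind, hb]
        cases hr : (List.range ys.length).find? (pvBadS ys) <;>
          simp [pvStepMin, hle, hmin] <;> push_cast <;> ring
      · have hb : pvBadS (y :: ys) 0 = true := by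
          simp only [pvBadS, decide_eq_true_eq]
          obtain ⟨l, hl, hv⟩ := List.mem_iff_getElem.mp hmem
          refine ⟨l + 1, by simpa using hl, by omega, ?_⟩
          rw [List.getD_cons_succ, List.getD_cons_zero, List.getD_eq_getElem _ _ hl, hv]
          omega
        rw [hfind, hb]
        simp [pvStepMin, hle, hmin, min_eq_right (by omega : m ≤ y)]

lemma pvB_eq (arr : List Int) :
    printUnsorted_alt arr = [pvFirst arr.length (pvBadS arr), pvLast arr.length (pvBadE arr)] := by
  simp only [printUnsorted_alt]
  rw [pvFoldMax_inv, pvFoldMin_inv]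
  unfold pvFirst
  cases h : (List.range arr.length).find? (pvBadS arr) <;> simp

-- ---- the combinatorial core ----

lemma pvGetD_mem_drop (xs : List Int) (j l : Nat) (hjl : j ≤ l) (hl : l < xs.length) :
    xs.getD l 0 ∈ xs.drop j := by
  have hidx : l - j < (xs.drop j).length := by simp [List.length_drop]; omega
  have he : (xs.drop j)[l - j]'hidx = xs.getD l 0 := by
    rw [List.getElem_drop, List.getD_eq_getElem _ _ hl]
    congr 1; omega
  rw [← he]; exact List.getElem_mem hidx

lemma pvMem_drop_getD (xs : List Int) (j : Nat) (x : Int) (hx : x ∈ xs.drop j) :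
    ∃ l, j ≤ l ∧ l < xs.length ∧ xs.getD l 0 = x := by
  obtain ⟨i, hi, hv⟩ := List.mem_iff_getElem.mp hx
  rw [List.getElem_drop] at hv
  simp only [List.length_drop] at hi
  exact ⟨j + i, by omega, by omega, by rw [List.getD_eq_getElem _ _ (by omega)]; exact hv⟩

lemma pvGetD_mem_take (xs : List Int) (j l : Nat) (hjl : l < j) (hl : l < xs.length) :
    xs.getD l 0 ∈ xs.take j := by
  have hidx : l < (xs.take j).length := by simp [List.length_take]; omega
  have he : (xs.take j)[l]'hidx = xs.getD l 0 := by
    rw [List.getElem_take, List.getD_eq_getElem _ _ hl]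
  rw [← he]; exact List.getElem_mem hidx

lemma pvMem_take_getD (xs : List Int) (j : Nat) (x : Int) (hx : x ∈ xs.take j) :
    ∃ l, l < j ∧ l < xs.length ∧ xs.getD l 0 = x := by
  obtain ⟨i, hi, hv⟩ := List.mem_iff_getElem.mp hx
  simp only [List.length_take, lt_min_iff] at hi
  rw [List.getElem_take] at hv
  exact ⟨i, by omega, by omega, by rw [List.getD_eq_getElem _ _ (by omega)]; exact hv⟩

lemma pvSorted_getD_mono (arr : List Int) (p q : Nat) (hpq : p ≤ q)
    (hq : q < (PySem.List.sorted arr (fun x => x) false).length) :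
    (PySem.List.sorted arr (fun x => x) false).getD p 0 ≤ (PySem.List.sorted arr (fun x => x) false).getD q 0 := by
  rw [List.getD_eq_getElem _ _ (by omega), List.getD_eq_getElem _ _ hq]
  exact PySem.List.sorted_id_getElem_mono arr hpq hq

lemma pvDrop_perm (arr : List Int) (j : Nat)
    (h : ∀ m < j, arr.getD m 0 = (PySem.List.sorted arr (fun x => x) false).getD m 0) :
    (arr.drop j).Perm ((PySem.List.sorted arr (fun x => x) false).drop j) := by
  have hlen : (PySem.List.sorted arr (fun x => x) false).length = arr.length := by
    simp [PySem.List.length_sorted]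
  have htake : arr.take j = (PySem.List.sorted arr (fun x => x) false).take j := by
    apply List.ext_getElem (by simp [hlen])
    intro i h1 h2
    simp only [List.length_take, lt_min_iff] at h1
    rw [List.getElem_take, List.getElem_take]
    have := h i h1.1
    rwa [List.getD_eq_getElem _ _ h1.2, List.getD_eq_getElem _ _ (by omega : i < (PySem.List.sorted arr (fun x => x) false).length)] at this
  have hperm : (PySem.List.sorted arr (fun x => x) false).Perm arr := PySem.List.sorted_perm arr (fun x => x) false
  have h2 : ((PySem.List.sorted arr (fun x => x) false).take j ++ (PySem.List.sorted arr (fun x => x) false).drop j).Perm (arr.take j ++ arr.drop j) := by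
    simpa [List.take_append_drop] using hperm
  rw [← htake] at h2
  exact ((List.perm_append_left_iff _).mp h2).symm

lemma pvTake_perm (arr : List Int) (j : Nat)
    (h : ∀ m, j ≤ m → m < arr.length → arr.getD m 0 = (PySem.List.sorted arr (fun x => x) false).getD m 0) :
    (arr.take j).Perm ((PySem.List.sorted arr (fun x => x) false).take j) := by
  have hlen : (PySem.List.sorted arr (fun x => x) false).length = arr.length := by
    simp [PySem.List.length_sorted]
  have hdrop : arr.drop j = (PySem.List.sorted arr (fun x => x) false).drop j := by
    apply List.ext_getElem (by simp [hlen])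
    intro i h1 h2
    simp only [List.length_drop] at h1
    rw [List.getElem_drop, List.getElem_drop]
    have hm : j + i < arr.length := by omega
    have := h (j + i) (by omega) hm
    rwa [List.getD_eq_getElem _ _ hm, List.getD_eq_getElem _ _ (by omega : j + i < (PySem.List.sorted arr (fun x => x) false).length)] at this
  have hperm : (PySem.List.sorted arr (fun x => x) false).Perm arr := PySem.List.sorted_perm arr (fun x => x) false
  have h2 : ((PySem.List.sorted arr (fun x => x) false).take j ++ (PySem.List.sorted arr (fun x => x) false).drop j).Perm (arr.take j ++ arr.drop j) := by
    simpa [List.take_append_drop] using hperm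
  rw [← hdrop] at h2
  exact ((List.perm_append_right_iff _).mp h2).symm

lemma pvPrefix_equiv (arr : List Int) (k : Nat) (hk : k ≤ arr.length) :
    ((∀ j < k, ¬ pvMism arr (PySem.List.sorted arr (fun x => x) false) j) ↔ (∀ j < k, ¬ pvBadS arr j)) := by
  have hlen : (PySem.List.sorted arr (fun x => x) false).length = arr.length := by
    simp [PySem.List.length_sorted]
  constructor
  · intro heq
    have heq' : ∀ m < k, arr.getD m 0 = (PySem.List.sorted arr (fun x => x) false).getD m 0 := by
      intro m hm
      have := heq m hm
      simpa [pvMism] using this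
    intro j hj
    simp only [pvBadS, decide_eq_true_eq, not_exists, not_and, not_lt]
    intro l hl hjl
    have hdp := pvDrop_perm arr (j + 1) (fun m hm => heq' m (by omega))
    have hmem : arr.getD l 0 ∈ (PySem.List.sorted arr (fun x => x) false).drop (j + 1) :=
      hdp.mem_iff.mp (pvGetD_mem_drop arr (j + 1) l (by omega) hl)
    obtain ⟨m, hm1, hm2, hv⟩ := pvMem_drop_getD _ _ _ hmem
    have hmono := pvSorted_getD_mono arr j m (by omega) hm2
    have hje := heq' j hj
    omega
  · intro hC
    have hres : ∀ j, j < k → arr.getD j 0 = (PySem.List.sorted arr (fun x => x) false).getD j 0 := by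
      intro j
      induction j using Nat.strong_induction_on with
      | _ j IH =>
        intro hjk
        have hdp := pvDrop_perm arr j (fun m hm => IH m hm (by omega))
        have hja : j < arr.length := by omega
        have hnb : ∀ l, l < arr.length → j < l → arr.getD j 0 ≤ arr.getD l 0 := by
          have := hC j hjk
          simp only [pvBadS, decide_eq_true_eq, not_exists, not_and, not_lt] at this
          exact this
        have h1 : arr.getD j 0 ∈ (PySem.List.sorted arr (fun x => x) false).drop j :=
          hdp.mem_iff.mp (pvGetD_mem_drop arr j j le_rfl hja)
        obtain ⟨m, hm1, hm2, hv⟩ := pvMem_drop_getD _ _ _ h1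
        have hmono := pvSorted_getD_mono arr j m hm1 hm2
        have h2 : (PySem.List.sorted arr (fun x => x) false).getD j 0 ∈ arr.drop j :=
          hdp.mem_iff.mpr (pvGetD_mem_drop _ j j le_rfl (by omega))
        obtain ⟨l, hl1, hl2, hv2⟩ := pvMem_drop_getD _ _ _ h2
        rcases Nat.eq_or_lt_of_le hl1 with h0 | hpos
        · rw [← h0] at hv2; omega
        · have := hnb l hl2 hpos
          omega
    intro j hj
    simp only [pvMism, decide_eq_true_eq]
    exact fun hne => hne (hres j hj)

lemma pvSuffix_equiv (arr : List Int) (k : Nat) (hk : k ≤ arr.length) :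
    ((∀ j, k ≤ j → j < arr.length → ¬ pvMism arr (PySem.List.sorted arr (fun x => x) false) j) ↔
     (∀ j, k ≤ j → j < arr.length → ¬ pvBadE arr j)) := by
  have hlen : (PySem.List.sorted arr (fun x => x) false).length = arr.length := by
    simp [PySem.List.length_sorted]
  constructor
  · intro heq
    have heq' : ∀ m, k ≤ m → m < arr.length → arr.getD m 0 = (PySem.List.sorted arr (fun x => x) false).getD m 0 := by
      intro m hm1 hm2
      have := heq m hm1 hm2
      simpa [pvMism] using this
    intro j hkj hjn
    simp only [pvBadE, decide_eq_true_eq, not_exists, not_and, not_lt]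
    intro l hl
    have htp := pvTake_perm arr j (fun m hm1 hm2 => heq' m (by omega) hm2)
    have hmem : arr.getD l 0 ∈ (PySem.List.sorted arr (fun x => x) false).take j :=
      htp.mem_iff.mp (pvGetD_mem_take arr j l hl (by omega))
    obtain ⟨m, hm1, hm2, hv⟩ := pvMem_take_getD _ _ _ hmem
    have hmono := pvSorted_getD_mono arr m j (by omega) (by omega)
    have hje := heq' j hkj hjn
    omega
  · intro hC
    have hres : ∀ d j, k ≤ j → j < arr.length → arr.length - j ≤ d → arr.getD j 0 = (PySem.List.sorted arr (fun x => x) false).getD j 0 := by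
      intro d
      induction d with
      | zero => intro j _ hjn hd; omega
      | succ d IH =>
        intro j hkj hjn hd
        have htp := pvTake_perm arr (j + 1) (fun m hm1 hm2 => IH m (by omega) hm2 (by omega))
        have hnb : ∀ l, l < j → arr.getD l 0 ≤ arr.getD j 0 := by
          have := hC j hkj hjn
          simp only [pvBadE, decide_eq_true_eq, not_exists, not_and, not_lt] at this
          exact this
        have h1 : arr.getD j 0 ∈ (PySem.List.sorted arr (fun x => x) false).take (j + 1) :=
          htp.mem_iff.mp (pvGetD_mem_take arr (j + 1) j (by omega) hjn)
        obtain ⟨m, hm1, hm2, hv⟩ := pvMem_take_getD _ _ _ h1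
        have hmono := pvSorted_getD_mono arr m j (by omega) (by omega)
        have h2 : (PySem.List.sorted arr (fun x => x) false).getD j 0 ∈ arr.take (j + 1) :=
          htp.mem_iff.mpr (pvGetD_mem_take _ (j + 1) j (by omega) (by omega))
        obtain ⟨l, hl1, hl2, hv2⟩ := pvMem_take_getD _ _ _ h2
        rcases Nat.lt_succ_iff_lt_or_eq.mp hl1 with hpos | h0
        · have := hnb l hpos
          omega
        · rw [h0] at hv2; omega
    intro j hkj hjn
    simp only [pvMism, decide_eq_true_eq]
    exact fun hne => hne (hres arr.length j hkj hjn (by omega))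

-- ===== VERDICT (by name: the statement is the Claim_ definition above) =====
theorem printUnsorted_spec : Claim_equal_printUnsorted := by
  intro arr _
  unfold Spec_printUnsorted
  rw [pvA_eq, pvB_eq]
  rw [pvFirst_congr arr.length _ _ (fun k hk => pvPrefix_equiv arr k hk),
      pvLast_congr arr.length _ _ (fun k hk => pvSuffix_equiv arr k hk)]
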